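-- pv_equiv track=rewrite | github.com/PatoLocos/Erdos530 | singer_sidon.py | verify_sidon_mod
-- ===== SOURCE A (Python) =====
-- def verify_sidon_mod(S, m):
--     """Verify S is a Sidon set modulo m (all differences distinct mod m)."""
--     diffs = set()
--     S = sorted(S)
--     for i in range(len(S)):
--         for j in range(i+1, len(S)):
--             d = (S[i] - S[j]) % m
--             if d in diffs:
--                 return False
--             diffs.add(d)
--             d2 = (S[j] - S[i]) % m
--             if d2 in diffs:
--                 return False
--             diffs.add(d2)
--     return True
-- ===== SOURCE B (Python) =====
-- def verify_sidon_mod(S, m):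
--     """Verify S is a Sidon set modulo m via the equivalent B2 characterization:
--     all pairwise sums S[i]+S[j] with i <= j (diagonal included) are distinct
--     mod m.  Builds the whole list of sums, then compares its size with the
--     size of its set -- no sort, no incremental early-exit scan."""
--     if len(S) < 2:
--         return True
--     n = len(S)
--     sums = [(S[i] + S[j]) % m for i in range(n) for j in range(i, n)]
--     return len(set(sums)) == len(sums)
-- ===== Notes on version B (the rewrite author's own statement) =====
-- stated objective: alternative
-- what changed: B tests the equivalent B2 characterization of a Sidon set: it materialises the list of all pairwise sums S[i]+S[j] (i<=j, diagonal included) mod m in one comprehension and decides by comparing len(set(sums)) with len(sums), instead of A's sorted copy with a nested early-exit scan growing a set of both directed differences.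
import Mathlib
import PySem

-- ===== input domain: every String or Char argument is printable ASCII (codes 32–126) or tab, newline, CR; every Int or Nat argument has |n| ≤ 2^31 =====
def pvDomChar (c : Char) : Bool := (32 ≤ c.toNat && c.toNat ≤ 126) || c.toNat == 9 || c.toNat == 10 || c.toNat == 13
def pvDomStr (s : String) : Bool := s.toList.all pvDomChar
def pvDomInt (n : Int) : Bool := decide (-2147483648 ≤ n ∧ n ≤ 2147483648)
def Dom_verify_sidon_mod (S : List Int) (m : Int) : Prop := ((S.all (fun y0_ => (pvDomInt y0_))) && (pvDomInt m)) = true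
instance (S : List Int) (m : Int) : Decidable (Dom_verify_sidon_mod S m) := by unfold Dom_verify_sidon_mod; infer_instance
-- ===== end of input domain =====

-- B replaces A's distinct-differences test (over a sorted copy, nested early-exit loops
-- growing a set) by the equivalent B2/Sidon characterization: it materialises the list of
-- all pairwise sums S[i]+S[j] (i ≤ j, diagonal included) mod m in one comprehension and
-- decides by comparing the size of its set with its length (alternative; not claimed faster).


-- ===== PORT A =====
-- 'for j in range(i+1, len(S))' body with the early 'return False' as an Option state;
-- range indices are always in range, so S[i] is pyGetD (exact here).
def vsmInner (S' : List Int) (m : Int) (i : Int) (js : List Int) (diffs : PySem.Set Int) : Option (PySem.Set Int) :=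
  match js with
  | [] => some diffs
  | j :: rest =>
    let d := PySem.Int.mod (PySem.List.pyGetD S' i 0 - PySem.List.pyGetD S' j 0) m
    if PySem.Set.contains diffs d then none
    else
      let diffs1 := PySem.Set.add diffs d
      let d2 := PySem.Int.mod (PySem.List.pyGetD S' j 0 - PySem.List.pyGetD S' i 0) m
      if PySem.Set.contains diffs1 d2 then none
      else vsmInner S' m i rest (PySem.Set.add diffs1 d2)

def vsmOuter (S' : List Int) (m : Int) (is : List Int) (diffs : PySem.Set Int) : Bool :=
  match is with
  | [] => true
  | i :: rest =>
    match vsmInner S' m i (PySem.List.pyRange (i + 1) (S'.length : Int) 1) diffs with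
    | none => false
    | some diffs' => vsmOuter S' m rest diffs'

def verify_sidon_mod (S : List Int) (m : Int) : Bool :=
  let S' := PySem.List.sorted S (fun x => x) false
  vsmOuter S' m (PySem.List.pyRange 0 (S'.length : Int) 1) PySem.Set.empty

-- ===== PORT B =====
-- the comprehension '[(S[i]+S[j]) % m for i in range(n) for j in range(i, n)]'
-- followed by 'len(set(sums)) == len(sums)'
def verify_sidon_mod_alt (S : List Int) (m : Int) : Bool :=
  if S.length < 2 then true
  else
    let sums := (PySem.List.pyRange 0 (S.length : Int) 1).flatMap fun i =>
      (PySem.List.pyRange i (S.length : Int) 1).map fun j =>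
        PySem.Int.mod (PySem.List.pyGetD S i 0 + PySem.List.pyGetD S j 0) m
    PySem.Set.len (PySem.Set.ofList sums) == (sums.length : Int)

-- ===== PRECONDITION & SPEC =====
-- A raises ZeroDivisionError ('% 0') as soon as it reaches a pair, i.e. when m = 0 and
-- S has at least two elements; B raises there too. Those inputs are excluded, nothing else.
def Pre_verify_sidon_mod (S : List Int) (m : Int) : Prop := m ≠ 0 ∨ S.length < 2
instance (S : List Int) (m : Int) : Decidable (Pre_verify_sidon_mod S m) := by unfold Pre_verify_sidon_mod; infer_instance
def pvWitness_verify_sidon_mod : List Int × Int := ([1, 2, 5], 11)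

def Spec_verify_sidon_mod (S : List Int) (m : Int) (out : Bool) : Prop := out = verify_sidon_mod_alt S m
instance (S : List Int) (m : Int) (out : Bool) : Decidable (Spec_verify_sidon_mod S m out) := by unfold Spec_verify_sidon_mod; infer_instance

-- ===== CLAIM (what is proved, stated in full; the proofs are below) =====
def Claim_equal_verify_sidon_mod : Prop := ∀ (S : List Int) (m : Int), Dom_verify_sidon_mod S m → Pre_verify_sidon_mod S m → Spec_verify_sidon_mod S m (verify_sidon_mod S m)

-- ===== LEMMAS AND PROOFS =====

-- value at an Int index (both ports read their list only through this)
def gval (L : List Int) (i : Int) : Int := PySem.List.pyGetD L i 0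

-- duplicate scan: consume a list, none at the first element already seen (A's loops are this)
def dscan (seen : PySem.Set Int) : List Int → Option (PySem.Set Int)
  | [] => some seen
  | x :: xs => if PySem.Set.contains seen x then none else dscan (PySem.Set.add seen x) xs

theorem dscan_append (seen : PySem.Set Int) (xs ys : List Int) :
    dscan seen (xs ++ ys) = (dscan seen xs).bind (fun s => dscan s ys) := by
  induction xs generalizing seen with
  | nil => rfl
  | cons x xs ih => simp only [List.cons_append, dscan]; split <;> simp [ih]

theorem dscan_isSome (seen : PySem.Set Int) (l : List Int) :
    (dscan seen l).isSome = true ↔ (l.Nodup ∧ ∀ x ∈ l, x ∉ seen) := by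
  induction l generalizing seen with
  | nil => simp [dscan]
  | cons x xs ih =>
    simp only [dscan]
    split
    · rename_i h
      have hx : x ∈ seen := by simpa [PySem.Set.contains, List.contains_iff_mem] using h
      constructor
      · intro h'; simp at h'
      · rintro ⟨-, hfr⟩; exact absurd hx (hfr x (by simp))
    · rename_i h
      have hx : x ∉ seen := by simpa [PySem.Set.contains, List.contains_iff_mem] using h
      rw [ih]
      constructor
      · rintro ⟨hnd, hfr⟩
        have hprop : ∀ y ∈ xs, y ∉ seen ∧ y ≠ x := by
          intro y hy
          have h' := hfr y hy
          simp only [PySem.Set.mem_add] at h'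
          exact not_or.mp h'
        refine ⟨List.nodup_cons.mpr ⟨fun hx' => (hprop x hx').2 rfl, hnd⟩, ?_⟩
        intro y hy
        rcases List.mem_cons.mp hy with rfl | hy'
        · exact hx
        · exact (hprop y hy').1
      · rintro ⟨hnd', hfr⟩
        obtain ⟨hxxs, hnd⟩ := List.nodup_cons.mp hnd'
        refine ⟨hnd, ?_⟩
        intro y hy
        simp only [PySem.Set.mem_add]
        exact not_or.mpr ⟨hfr y (List.mem_cons.mpr (Or.inr hy)), fun h' => hxxs (h' ▸ hy)⟩

theorem dscan_empty_isSome (l : List Int) :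
    (dscan PySem.Set.empty l).isSome = true ↔ l.Nodup := by
  rw [dscan_isSome]
  simp [PySem.Set.empty]

-- A's two loops are a duplicate scan of its value list
theorem vsmInner_eq (S' : List Int) (m : Int) (i : Int) (js : List Int) (diffs : PySem.Set Int) :
    vsmInner S' m i js diffs =
      dscan diffs (js.flatMap fun j =>
        [PySem.Int.mod (gval S' i - gval S' j) m, PySem.Int.mod (gval S' j - gval S' i) m]) := by
  induction js generalizing diffs with
  | nil => rfl
  | cons j rest ih =>
    simp only [List.flatMap_cons, List.cons_append, List.nil_append, dscan, vsmInner, gval]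
    split
    · rfl
    · split
      · rfl
      · exact ih _

theorem vsmOuter_eq (S' : List Int) (m : Int) (is : List Int) (diffs : PySem.Set Int) :
    vsmOuter S' m is diffs =
      (dscan diffs (is.flatMap fun i =>
        (PySem.List.pyRange (i + 1) (S'.length : Int) 1).flatMap fun j =>
          [PySem.Int.mod (gval S' i - gval S' j) m, PySem.Int.mod (gval S' j - gval S' i) m])).isSome := by
  induction is generalizing diffs with
  | nil => rfl
  | cons i rest ih =>
    simp only [List.flatMap_cons, dscan_append, vsmOuter]
    rw [vsmInner_eq]
    cases dscan diffs ((PySem.List.pyRange (i + 1) (S'.length : Int) 1).flatMap fun j =>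
        [PySem.Int.mod (gval S' i - gval S' j) m, PySem.Int.mod (gval S' j - gval S' i) m]) with
    | none => rfl
    | some d => simpa using ih d

-- index-pair lists and value lists
def iltPairs (n : Int) : List (Int × Int) :=
  (PySem.List.pyRange 0 n 1).flatMap fun i => (PySem.List.pyRange (i + 1) n 1).map fun j => (i, j)

def ilePairs (n : Int) : List (Int × Int) :=
  (PySem.List.pyRange 0 n 1).flatMap fun i => (PySem.List.pyRange i n 1).map fun j => (i, j)

def dList (L : List Int) (m : Int) : List Int :=
  (iltPairs (L.length : Int)).flatMap fun p =>
    [PySem.Int.mod (gval L p.1 - gval L p.2) m, PySem.Int.mod (gval L p.2 - gval L p.1) m]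

def sList (L : List Int) (m : Int) : List Int :=
  (ilePairs (L.length : Int)).map fun p => PySem.Int.mod (gval L p.1 + gval L p.2) m

theorem mem_iltPairs (n : Int) (p : Int × Int) :
    p ∈ iltPairs n ↔ 0 ≤ p.1 ∧ p.1 < p.2 ∧ p.2 < n := by
  obtain ⟨a, b⟩ := p
  simp only [iltPairs, List.mem_flatMap, List.mem_map, PySem.List.mem_pyRange_one, Prod.mk.injEq]
  constructor
  · rintro ⟨i, ⟨h0, hn⟩, j, ⟨hj1, hj2⟩, rfl, rfl⟩; omega
  · rintro ⟨h0, hab, hbn⟩; exact ⟨a, by omega, b, by omega, rfl, rfl⟩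

theorem mem_ilePairs (n : Int) (p : Int × Int) :
    p ∈ ilePairs n ↔ 0 ≤ p.1 ∧ p.1 ≤ p.2 ∧ p.2 < n := by
  obtain ⟨a, b⟩ := p
  simp only [ilePairs, List.mem_flatMap, List.mem_map, PySem.List.mem_pyRange_one, Prod.mk.injEq]
  constructor
  · rintro ⟨i, ⟨h0, hn⟩, j, ⟨hj1, hj2⟩, rfl, rfl⟩; omega
  · rintro ⟨h0, hab, hbn⟩; exact ⟨a, by omega, b, by omega, rfl, rfl⟩

theorem nodup_pairBlocks (n : Int) (f : Int → List Int)
    (hmem : ∀ i, ∀ p ∈ (f i).map fun j => ((i : Int), j), p.1 = i)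
    (hnd : ∀ i, ((f i).map fun j => ((i : Int), j)).Nodup) :
    ((PySem.List.pyRange 0 n 1).flatMap fun i => (f i).map fun j => (i, j)).Nodup := by
  rw [List.nodup_flatMap]
  refine ⟨fun i _ => hnd i, ?_⟩
  have hlt := PySem.List.pairwise_lt_pyRange_one (a := 0) (b := n)
  refine hlt.imp ?_
  intro a b hab p hpa hpb
  have h1 := hmem a p hpa
  have h2 := hmem b p hpb
  omega

theorem nodup_iltPairs (n : Int) : (iltPairs n).Nodup := by
  apply nodup_pairBlocks
  · intro i p hp; simp only [List.mem_map] at hp; obtain ⟨j, -, rfl⟩ := hp; rfl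
  · intro i
    exact (PySem.List.nodup_pyRange_one _ _).map (fun x y h => by simpa using h)

theorem nodup_ilePairs (n : Int) : (ilePairs n).Nodup := by
  apply nodup_pairBlocks
  · intro i p hp; simp only [List.mem_map] at hp; obtain ⟨j, -, rfl⟩ := hp; rfl
  · intro i
    exact (PySem.List.nodup_pyRange_one _ _).map (fun x y h => by simpa using h)

-- len(set(l)) == len(l) decides Nodup
theorem ofList_length_eq_iff (l : List Int) :
    (PySem.Set.ofList l).length = l.length ↔ l.Nodup := by
  induction l with
  | nil => simp [PySem.Set.ofList_nil]
  | cons x xs ih =>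
    rw [PySem.Set.ofList_cons]
    by_cases hx : x ∈ xs
    · have h1 : (PySem.Set.discard (PySem.Set.ofList xs) x).length < (PySem.Set.ofList xs).length := by
        have hmem : x ∈ PySem.Set.ofList xs := (PySem.Set.mem_ofList _ _).mpr hx
        simp only [PySem.Set.discard]
        apply List.length_filter_lt_length_iff_exists.mpr
        exact ⟨x, hmem, by simp⟩
      have h2 : (PySem.Set.ofList xs).length ≤ xs.length := PySem.Set.length_ofList_le _
      constructor
      · intro h; simp only [List.length_cons] at h; omega
      · intro h; exact absurd hx (List.nodup_cons.mp h).1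
    · have hd : PySem.Set.discard (PySem.Set.ofList xs) x = PySem.Set.ofList xs := by
        simp only [PySem.Set.discard]
        apply List.filter_eq_self.mpr
        intro y hy
        have : y ∈ xs := (PySem.Set.mem_ofList _ _).mp hy
        simp only [Bool.not_eq_true', beq_eq_false_iff_ne, ne_eq]
        exact fun h => hx (h ▸ this)
      rw [hd]
      simp only [List.length_cons, List.nodup_cons]
      constructor
      · intro h; exact ⟨hx, ih.mp (by omega)⟩
      · rintro ⟨-, hnd⟩; rw [ih.mpr hnd]

-- the two ports compute Nodup of their value lists
theorem A_eq_nodup (S : List Int) (m : Int) :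
    verify_sidon_mod S m = true ↔ (dList (PySem.List.sorted S (fun x => x) false) m).Nodup := by
  unfold verify_sidon_mod
  rw [vsmOuter_eq, dscan_empty_isSome, dList, iltPairs]
  simp [List.flatMap_assoc, List.flatMap_map]

theorem B_eq_nodup (S : List Int) (m : Int) (h2 : ¬ S.length < 2) :
    verify_sidon_mod_alt S m = true ↔ (sList S m).Nodup := by
  unfold verify_sidon_mod_alt
  rw [if_neg h2]
  have hsums : ((PySem.List.pyRange 0 (S.length : Int) 1).flatMap fun i =>
      (PySem.List.pyRange i (S.length : Int) 1).map fun j =>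
        PySem.Int.mod (PySem.List.pyGetD S i 0 + PySem.List.pyGetD S j 0) m) = sList S m := by
    rw [sList, ilePairs]
    simp [List.map_flatMap, List.map_map, Function.comp_def, gval]
  simp only [hsums, PySem.Set.len, beq_iff_eq, Nat.cast_inj]
  exact ofList_length_eq_iff (sList S m)

-- Python '%': equal residues = congruence (for m ≠ 0)
theorem pymod_eq_iff (a b m : Int) (hm : m ≠ 0) :
    PySem.Int.mod a m = PySem.Int.mod b m ↔ m ∣ a - b := by
  have ha := PySem.Int.floordiv_mul_add_mod a m
  have hb := PySem.Int.floordiv_mul_add_mod b m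
  constructor
  · intro h
    exact ⟨PySem.Int.floordiv a m - PySem.Int.floordiv b m, by linear_combination hb - ha + h⟩
  · rintro ⟨c, hc⟩
    have hdvd : m ∣ PySem.Int.mod a m - PySem.Int.mod b m :=
      ⟨c - PySem.Int.floordiv a m + PySem.Int.floordiv b m, by linear_combination ha - hb + hc⟩
    have habs : |PySem.Int.mod a m - PySem.Int.mod b m| < |m| := by
      rcases lt_trichotomy m 0 with hneg | rfl | hpos
      · obtain ⟨b1a, b2a⟩ := PySem.Int.mod_neg_bounds a hneg
        obtain ⟨b1b, b2b⟩ := PySem.Int.mod_neg_bounds b hneg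
        rw [abs_of_neg hneg, abs_sub_lt_iff]
        omega
      · exact absurd rfl hm
      · have b1a := PySem.Int.mod_nonneg a hpos
        have b2a := PySem.Int.mod_lt a hpos
        have b1b := PySem.Int.mod_nonneg b hpos
        have b2b := PySem.Int.mod_lt b hpos
        rw [abs_of_pos hpos, abs_sub_lt_iff]
        omega
    have := Int.eq_zero_of_abs_lt_dvd ((abs_dvd _ _).mpr hdvd) habs
    omega

-- collision propositions
def QD (L : List Int) (m : Int) : Prop :=
  ∃ i j k l : Int,
    (0 ≤ i ∧ i < (L.length : Int)) ∧ (0 ≤ j ∧ j < (L.length : Int)) ∧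
    (0 ≤ k ∧ k < (L.length : Int)) ∧ (0 ≤ l ∧ l < (L.length : Int)) ∧
    i ≠ j ∧ k ≠ l ∧ (i, j) ≠ (k, l) ∧
    m ∣ (gval L i - gval L j) - (gval L k - gval L l)

def QS (L : List Int) (m : Int) : Prop :=
  ∃ i j k l : Int,
    (0 ≤ i ∧ i < (L.length : Int)) ∧ (0 ≤ j ∧ j < (L.length : Int)) ∧
    (0 ≤ k ∧ k < (L.length : Int)) ∧ (0 ≤ l ∧ l < (L.length : Int)) ∧
    (i, j) ≠ (k, l) ∧ (i, j) ≠ (l, k) ∧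
    m ∣ (gval L i + gval L j) - (gval L k + gval L l)

theorem dList_nodup_iff (L : List Int) (m : Int) (hm : m ≠ 0) :
    (dList L m).Nodup ↔ ¬ QD L m := by
  rw [dList, List.nodup_flatMap]
  constructor
  · rintro ⟨hblocks, hpair⟩ ⟨i, j, k, l, hi, hj, hk, hl, hij, hkl, hne, hdvd⟩
    have hmodeq : PySem.Int.mod (gval L i - gval L j) m = PySem.Int.mod (gval L k - gval L l) m :=
      (pymod_eq_iff _ _ _ hm).mpr hdvd
    have hdisj : ∀ p q, p ∈ iltPairs (L.length : Int) → q ∈ iltPairs (L.length : Int) → p ≠ q →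
        ∀ v, v ∈ [PySem.Int.mod (gval L p.1 - gval L p.2) m, PySem.Int.mod (gval L p.2 - gval L p.1) m] →
          v ∈ [PySem.Int.mod (gval L q.1 - gval L q.2) m, PySem.Int.mod (gval L q.2 - gval L q.1) m] → False := by
      intro p q hp hq hpq v hvp hvq
      have hsym : Symmetric (Function.onFun List.Disjoint
          (fun p : Int × Int => [PySem.Int.mod (gval L p.1 - gval L p.2) m, PySem.Int.mod (gval L p.2 - gval L p.1) m])) :=
        fun a b hab x hx1 hx2 => hab hx2 hx1
      exact (List.Pairwise.forall hsym hpair) hp hq hpq hvp hvq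
    have hblk : ∀ p, p ∈ iltPairs (L.length : Int) →
        PySem.Int.mod (gval L p.1 - gval L p.2) m ≠ PySem.Int.mod (gval L p.2 - gval L p.1) m := by
      intro p hp
      have := hblocks p hp
      simp only [List.nodup_cons, List.mem_singleton] at this
      exact this.1
    rcases lt_or_gt_of_ne hij with hij' | hij' <;> rcases lt_or_gt_of_ne hkl with hkl' | hkl'
    · have hp : ((i, j) : Int × Int) ∈ iltPairs (L.length : Int) := (mem_iltPairs _ _).mpr (by simp; omega)
      have hq : ((k, l) : Int × Int) ∈ iltPairs (L.length : Int) := (mem_iltPairs _ _).mpr (by simp; omega)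
      have hpq : ((i, j) : Int × Int) ≠ (k, l) := hne
      exact hdisj (i, j) (k, l) hp hq hpq (PySem.Int.mod (gval L i - gval L j) m)
        (by simp) (by simp [hmodeq])
    · have hp : ((i, j) : Int × Int) ∈ iltPairs (L.length : Int) := (mem_iltPairs _ _).mpr (by simp; omega)
      have hq : ((l, k) : Int × Int) ∈ iltPairs (L.length : Int) := (mem_iltPairs _ _).mpr (by simp; omega)
      by_cases hpq : ((i, j) : Int × Int) = (l, k)
      · obtain ⟨rfl, rfl⟩ : i = l ∧ j = k := by simpa [Prod.ext_iff] using hpq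
        exact hblk _ hp (by simpa using hmodeq)
      · exact hdisj (i, j) (l, k) hp hq hpq (PySem.Int.mod (gval L i - gval L j) m)
          (by simp) (by simp [hmodeq])
    · have hp : ((j, i) : Int × Int) ∈ iltPairs (L.length : Int) := (mem_iltPairs _ _).mpr (by simp; omega)
      have hq : ((k, l) : Int × Int) ∈ iltPairs (L.length : Int) := (mem_iltPairs _ _).mpr (by simp; omega)
      by_cases hpq : ((j, i) : Int × Int) = (k, l)
      · obtain ⟨rfl, rfl⟩ : j = k ∧ i = l := by simpa [Prod.ext_iff] using hpq
        exact hblk _ hp (by simpa using hmodeq.symm)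
      · exact hdisj (j, i) (k, l) hp hq hpq (PySem.Int.mod (gval L i - gval L j) m)
          (by simp) (by simp [hmodeq])
    · have hp : ((j, i) : Int × Int) ∈ iltPairs (L.length : Int) := (mem_iltPairs _ _).mpr (by simp; omega)
      have hq : ((l, k) : Int × Int) ∈ iltPairs (L.length : Int) := (mem_iltPairs _ _).mpr (by simp; omega)
      have hpq : ((j, i) : Int × Int) ≠ (l, k) := by
        simp only [ne_eq, Prod.ext_iff, not_and] at hne ⊢
        intro h1 h2; exact absurd (by omega : i = k ∧ j = l) (by simpa using hne)
      exact hdisj (j, i) (l, k) hp hq hpq (PySem.Int.mod (gval L i - gval L j) m)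
        (by simp) (by simp [hmodeq])
  · intro hq
    refine ⟨?_, ?_⟩
    · intro p hp
      rw [mem_iltPairs] at hp
      simp only [List.nodup_cons, List.mem_singleton, List.not_mem_nil, not_false_iff, and_true,
        List.nodup_nil]
      intro heq
      exact hq ⟨p.1, p.2, p.2, p.1, by omega, by omega, by omega, by omega, by omega, by omega,
        by simp [Prod.ext_iff]; omega,
        (pymod_eq_iff _ _ _ hm).mp heq⟩
    · apply (nodup_iltPairs _).pairwise_of_forall_ne
      intro p hp q hq' hpq
      rw [mem_iltPairs] at hp hq'
      intro v hvp hvq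
      have hpairne : ¬ (p.1 = q.1 ∧ p.2 = q.2) := fun h => hpq (Prod.ext_iff.mpr ⟨h.1, h.2⟩)
      simp only [List.mem_cons, List.not_mem_nil, or_false] at hvp hvq
      rcases hvp with rfl | rfl <;> rcases hvq with heq | heq
      · exact hq ⟨p.1, p.2, q.1, q.2, by omega, by omega, by omega, by omega, by omega, by omega,
          by simp [Prod.ext_iff]; omega, (pymod_eq_iff _ _ _ hm).mp heq⟩
      · exact hq ⟨p.1, p.2, q.2, q.1, by omega, by omega, by omega, by omega, by omega, by omega,
          by simp [Prod.ext_iff]; omega, (pymod_eq_iff _ _ _ hm).mp heq⟩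
      · exact hq ⟨p.2, p.1, q.1, q.2, by omega, by omega, by omega, by omega, by omega, by omega,
          by simp [Prod.ext_iff]; omega, (pymod_eq_iff _ _ _ hm).mp heq⟩
      · exact hq ⟨p.2, p.1, q.2, q.1, by omega, by omega, by omega, by omega, by omega, by omega,
          by simp [Prod.ext_iff]; omega, (pymod_eq_iff _ _ _ hm).mp heq⟩

theorem sList_nodup_iff (L : List Int) (m : Int) (hm : m ≠ 0) :
    (sList L m).Nodup ↔ ¬ QS L m := by
  rw [sList, List.nodup_map_iff_inj_on (nodup_ilePairs _)]
  constructor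
  · intro hinj hqs
    obtain ⟨i, j, k, l, hi, hj, hk, hl, hne1, hne2, hdvd⟩ := hqs
    have hmodeq : PySem.Int.mod (gval L i + gval L j) m = PySem.Int.mod (gval L k + gval L l) m :=
      (pymod_eq_iff _ _ _ hm).mpr hdvd
    rcases le_or_gt i j with hij | hij <;> rcases le_or_gt k l with hkl | hkl
    · have := hinj (i, j) ((mem_ilePairs _ _).mpr (by simp; omega))
        (k, l) ((mem_ilePairs _ _).mpr (by simp; omega)) (by simpa using hmodeq)
      simp only [Prod.ext_iff] at this
      exact hne1 (Prod.ext_iff.mpr ⟨this.1, this.2⟩)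
    · have := hinj (i, j) ((mem_ilePairs _ _).mpr (by simp; omega))
        (l, k) ((mem_ilePairs _ _).mpr (by simp; omega))
        (by simpa [Int.add_comm (gval L l) (gval L k)] using hmodeq)
      simp only [Prod.ext_iff] at this
      exact hne2 (Prod.ext_iff.mpr ⟨this.1, this.2⟩)
    · have := hinj (j, i) ((mem_ilePairs _ _).mpr (by simp; omega))
        (k, l) ((mem_ilePairs _ _).mpr (by simp; omega))
        (by simpa [Int.add_comm (gval L i) (gval L j)] using hmodeq)
      simp only [Prod.ext_iff] at this
      apply hne2
      have h1 : j = k := this.1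
      have h2 : i = l := this.2
      simp [h1, h2]
    · have := hinj (j, i) ((mem_ilePairs _ _).mpr (by simp; omega))
        (l, k) ((mem_ilePairs _ _).mpr (by simp; omega))
        (by simpa [Int.add_comm (gval L i) (gval L j), Int.add_comm (gval L l) (gval L k)] using hmodeq)
      simp only [Prod.ext_iff] at this
      apply hne1
      have h1 : j = l := this.1
      have h2 : i = k := this.2
      simp [h1, h2]
  · intro hq p hp q hq' hfeq
    by_contra hne
    rw [mem_ilePairs] at hp hq'
    apply hq
    have hpairne : ¬ (p.1 = q.1 ∧ p.2 = q.2) := fun h => hne (Prod.ext_iff.mpr ⟨h.1, h.2⟩)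
    exact ⟨p.1, p.2, q.1, q.2, by omega, by omega, by omega, by omega,
      by simp [Prod.ext_iff]; omega, by simp [Prod.ext_iff]; omega,
      (pymod_eq_iff _ _ _ hm).mp hfeq⟩

theorem qd_iff_qs (L : List Int) (m : Int) : QD L m ↔ QS L m := by
  constructor
  · rintro ⟨i, j, k, l, hi, hj, hk, hl, hij, hkl, hne, hdvd⟩
    refine ⟨i, l, k, j, hi, hl, hk, hj, ?_, ?_, ?_⟩
    · simp only [ne_eq, Prod.ext_iff, not_and] at hne ⊢
      intro h1 h2
      exact absurd (by omega : i = k ∧ j = l) (by simpa using hne)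
    · simp only [ne_eq, Prod.ext_iff, not_and]
      intro h1 _; omega
    · have : (gval L i + gval L l) - (gval L k + gval L j)
          = (gval L i - gval L j) - (gval L k - gval L l) := by ring
      rw [this]; exact hdvd
  · rintro ⟨i, j, k, l, hi, hj, hk, hl, hne1, hne2, hdvd⟩
    by_cases hik : i = k
    · subst hik
      have hjl : j ≠ l := fun h => hne1 (by rw [h])
      have h' : m ∣ gval L j - gval L l := by
        have : gval L j - gval L l = (gval L i + gval L j) - (gval L i + gval L l) := by ring
        rw [this]; exact hdvd
      refine ⟨j, l, l, j, hj, hl, hl, hj, hjl, hjl.symm, ?_, ?_⟩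
      · simp [Prod.ext_iff]; omega
      · have : (gval L j - gval L l) - (gval L l - gval L j)
            = (gval L j - gval L l) + (gval L j - gval L l) := by ring
        rw [this]; exact dvd_add h' h'
    · by_cases hjl : j = l
      · subst hjl
        have h' : m ∣ gval L i - gval L k := by
          have : gval L i - gval L k = (gval L i + gval L j) - (gval L k + gval L j) := by ring
          rw [this]; exact hdvd
        refine ⟨i, k, k, i, hi, hk, hk, hi, hik, Ne.symm hik, ?_, ?_⟩
        · simp [Prod.ext_iff]; omega
        · have : (gval L i - gval L k) - (gval L k - gval L i)
              = (gval L i - gval L k) + (gval L i - gval L k) := by ring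
          rw [this]; exact dvd_add h' h'
      · refine ⟨i, k, l, j, hi, hk, hl, hj, hik, Ne.symm hjl, ?_, ?_⟩
        · simp only [ne_eq, Prod.ext_iff, not_and] at hne2 ⊢
          intro h1 h2
          exact absurd (by omega : i = l ∧ j = k) (by simpa using hne2)
        · have : (gval L i - gval L k) - (gval L l - gval L j)
              = (gval L i + gval L j) - (gval L k + gval L l) := by ring
          rw [this]; exact hdvd

theorem perm_index_map {L L' : List Int} (h : L.Perm L') :
    ∃ σ : Nat → Nat,
      (∀ i, i < L.length → σ i < L.length ∧ L.getD i 0 = L'.getD (σ i) 0) ∧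
      (∀ i j, i < L.length → j < L.length → σ i = σ j → i = j) := by
  induction h with
  | nil =>
    exact ⟨id, fun i hi => absurd hi (by simp), fun i j hi _ _ => absurd hi (by simp)⟩
  | cons x h ih =>
    obtain ⟨σ, hv, hinj⟩ := ih
    refine ⟨fun i => match i with | 0 => 0 | Nat.succ i => σ i + 1, ?_, ?_⟩
    · intro i hi
      cases i with
      | zero => simp
      | succ i =>
        obtain ⟨hb, he⟩ := hv i (by simpa using hi)
        refine ⟨by simpa using hb, ?_⟩
        simpa using he
    · intro i j hi hj hσ
      cases i with
      | zero => cases j with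
        | zero => rfl
        | succ j => simp at hσ
      | succ i => cases j with
        | zero => simp at hσ
        | succ j =>
          have hσ' : σ i + 1 = σ j + 1 := hσ
          have := hinj i j (by simpa using hi) (by simpa using hj) (by omega)
          omega
  | swap x y l =>
    refine ⟨fun i => if i = 0 then 1 else if i = 1 then 0 else i, ?_, ?_⟩
    · intro i hi
      match i with
      | 0 => simp
      | 1 => simp
      | (n + 2) =>
        refine ⟨by simpa using hi, ?_⟩
        simp
    · intro i j hi hj hσ
      have hσ' : (if i = 0 then 1 else if i = 1 then 0 else i)
          = (if j = 0 then 1 else if j = 1 then 0 else j) := hσ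
      split_ifs at hσ' <;> omega
  | trans h1 h2 ih1 ih2 =>
    obtain ⟨σ1, hv1, hinj1⟩ := ih1
    obtain ⟨σ2, hv2, hinj2⟩ := ih2
    have hlen : _ := h1.length_eq
    refine ⟨fun i => σ2 (σ1 i), ?_, ?_⟩
    · intro i hi
      obtain ⟨hb1, he1⟩ := hv1 i hi
      obtain ⟨hb2, he2⟩ := hv2 (σ1 i) (by omega)
      refine ⟨?_, ?_⟩
      · show σ2 (σ1 i) < _
        omega
      · show _ = _root_.List.getD _ (σ2 (σ1 i)) 0
        rw [he1, he2]
    · intro i j hi hj hσ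
      have hb1 := (hv1 i hi).1
      have hb2 := (hv1 j hj).1
      exact hinj1 i j hi hj (hinj2 _ _ (by omega) (by omega) hσ)

theorem gval_eq_getD (M : List Int) (a : Int) (h0 : 0 ≤ a) (_hlt : a < (M.length : Int)) :
    gval M a = M.getD a.toNat 0 := by
  have ha : a = ((a.toNat : Nat) : Int) := by omega
  rw [gval, ha, PySem.List.pyGetD_natCast, Int.toNat_natCast]

theorem qs_of_perm {L L' : List Int} (h : L.Perm L') (m : Int) : QS L m → QS L' m := by
  rintro ⟨i, j, k, l, hi, hj, hk, hl, hne1, hne2, hdvd⟩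
  obtain ⟨σ, hv, hinj⟩ := perm_index_map h
  have hlen := h.length_eq
  have hmap : ∀ a : Int, 0 ≤ a → a < (L.length : Int) →
      ((σ a.toNat : Int) < (L'.length : Int) ∧ 0 ≤ (σ a.toNat : Int)) ∧
        gval L a = gval L' (σ a.toNat) := by
    intro a h0 hlt
    obtain ⟨hb, he⟩ := hv a.toNat (by omega)
    refine ⟨⟨by omega, by omega⟩, ?_⟩
    rw [gval_eq_getD L a h0 hlt, he,
      gval_eq_getD L' (σ a.toNat) (by omega) (by omega)]
    simp
  obtain ⟨⟨hbi, hci⟩, hei⟩ := hmap i hi.1 hi.2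
  obtain ⟨⟨hbj, hcj⟩, hej⟩ := hmap j hj.1 hj.2
  obtain ⟨⟨hbk, hck⟩, hek⟩ := hmap k hk.1 hk.2
  obtain ⟨⟨hbl, hcl⟩, hel⟩ := hmap l hl.1 hl.2
  have hinj' : ∀ a b : Int, 0 ≤ a → a < (L.length : Int) → 0 ≤ b → b < (L.length : Int) →
      (σ a.toNat : Int) = (σ b.toNat : Int) → a = b := by
    intro a b ha0 halt hb0 hblt hab
    have := hinj a.toNat b.toNat (by omega) (by omega) (by omega)
    omega
  refine ⟨(σ i.toNat : Int), (σ j.toNat : Int), (σ k.toNat : Int), (σ l.toNat : Int),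
    ⟨hci, hbi⟩, ⟨hcj, hbj⟩, ⟨hck, hbk⟩, ⟨hcl, hbl⟩, ?_, ?_, ?_⟩
  · intro hcontra
    apply hne1
    have h1 : (σ i.toNat : Int) = (σ k.toNat : Int) := congrArg Prod.fst hcontra
    have h2 : (σ j.toNat : Int) = (σ l.toNat : Int) := congrArg Prod.snd hcontra
    have e1 := hinj' i k hi.1 hi.2 hk.1 hk.2 h1
    have e2 := hinj' j l hj.1 hj.2 hl.1 hl.2 h2
    rw [e1, e2]
  · intro hcontra
    apply hne2
    have h1 : (σ i.toNat : Int) = (σ l.toNat : Int) := congrArg Prod.fst hcontra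
    have h2 : (σ j.toNat : Int) = (σ k.toNat : Int) := congrArg Prod.snd hcontra
    have e1 := hinj' i l hi.1 hi.2 hl.1 hl.2 h1
    have e2 := hinj' j k hj.1 hj.2 hk.1 hk.2 h2
    rw [e1, e2]
  · rw [← hei, ← hej, ← hek, ← hel]
    exact hdvd

theorem A_short (S : List Int) (m : Int) (h2 : S.length < 2) :
    verify_sidon_mod S m = true := by
  rw [A_eq_nodup]
  have hnil : iltPairs (((PySem.List.sorted S (fun x => x) false).length : Int)) = [] := by
    rw [List.eq_nil_iff_forall_not_mem]
    intro p hp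
    rw [mem_iltPairs] at hp
    rw [PySem.List.length_sorted] at hp
    have : ((S.length : Int)) < 2 := by exact_mod_cast Nat.cast_lt_ofNat.mpr h2
    omega
  rw [dList, hnil]
  simp

-- ===== VERDICT (by name: the statement is the Claim_ definition above) =====
theorem verify_sidon_mod_spec : Claim_equal_verify_sidon_mod := by
  intro S m _ hpre
  unfold Spec_verify_sidon_mod
  by_cases h2 : S.length < 2
  · rw [A_short S m h2]
    unfold verify_sidon_mod_alt
    rw [if_pos h2]
  · have hm : m ≠ 0 := hpre.resolve_right h2
    have hperm : (PySem.List.sorted S (fun x => x) false).Perm S := PySem.List.sorted_perm S _ _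
    have hiff : verify_sidon_mod S m = true ↔ verify_sidon_mod_alt S m = true := by
      rw [A_eq_nodup, B_eq_nodup S m h2,
        dList_nodup_iff _ m hm, sList_nodup_iff _ m hm, qd_iff_qs]
      constructor
      · intro hn hq; exact hn (qs_of_perm hperm.symm m hq)
      · intro hn hq; exact hn (qs_of_perm hperm m hq)
    cases hA : verify_sidon_mod S m <;> cases hB : verify_sidon_mod_alt S m <;> simp_all
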